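-- pv_equiv track=rewrite | github.com/dgoffredo/hackerrank | determining-dna-health/combined-state-machines.py | compile_states
-- ===== SOURCE A (Python) =====
-- debug = lambda *_: None
--
-- def compile_states(gene, index):
--     assert gene # not empty
--     assert index >= 0
--
--     # special case for genes of length one (makes things simpler below):
--     if len(gene) == 1:
--         states = [{gene: (0, [index])}]
--         debug('gene', gene, 'produced the state transitions:', states)
--         return states
--
--     states = []
--     for i, char in enumerate(gene):
--         edges = {} # {current_char: (next_state_index, [gene indices...])}
--
--         # There are a few cases to consider (making up to two edges):
--         # 1. We are about to finish matching the gene.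
--         # 2. We are transitioning to the next character in the gene.
--         # 3. We are transitioning to some prefix of the gene.
--
--         # 1)
--         if i == len(gene) - 1:
--             next_state_index = index_of_largest_suffix_prefix(gene, gene)
--             edges[char] = next_state_index, [index]
--         # 2)
--         else:
--             edges[char] = i + 1, []
--
--         # 3)
--         if char != gene[0]:
--             suffix = gene[:i] + gene[0]
--             next_state_index = index_of_largest_suffix_prefix(gene, suffix)
--             edges[gene[0]] = next_state_index, []
--
--         states.append(edges)
--
--     debug('gene', gene, 'produced the state transitions:', states)
--     return states
--
-- def index_of_largest_suffix_prefix(prefixed, suffixed):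
--     """Return the index into `prefixed` that is one past the largest proper
--     prefix of `prefixed` that is a proper suffix of `suffixed`, or return zero
--     if no proper prefix of `prefixed` is a proper suffix of `suffixed`.
--     """
--     # TODO: There's probably a better way to do this. It's probably important.
--     for i in range(len(prefixed) - 1, 0, -1):
--         prefix = prefixed[:i]
--         if suffixed.endswith(prefix):
--             return i
--
--     return 0
-- ===== SOURCE B (Python) =====
-- def compile_states(gene, index):
--     assert gene # not empty
--     assert index >= 0
--
--     L = len(gene)
--     # KMP failure function: fail[m] = length of longest proper prefix of gene
--     # that is a suffix of gene[:m], for 1 <= m <= L.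
--     fail = [0] * (L + 1)
--     k = 0
--     for i in range(1, L):
--         while k > 0 and gene[i] != gene[k]:
--             k = fail[k]
--         if gene[i] == gene[k]:
--             k += 1
--         fail[i + 1] = k
--
--     # trans[i] = automaton transition from state i on the gene's first
--     # character, derived left-to-right from fail in O(L).
--     first = gene[0]
--     trans = [1] * L
--     for i in range(1, L):
--         trans[i] = i + 1 if gene[i] == first else trans[fail[i]]
--
--     states = []
--     for i in range(L):
--         if i == L - 1:
--             edges = {gene[i]: (fail[L], [index])}
--         else:
--             edges = {gene[i]: (i + 1, [])}
--         if gene[i] != first: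
--             edges[first] = (trans[i], [])
--         states.append(edges)
--     return states
-- ===== Notes on version B (the rewrite author's own statement) =====
-- stated objective: faster
-- what changed: Replaces A's per-state suffix scans (each state calls an O(L^2) largest-suffix-prefix search over slices of the gene) with a single KMP failure-function pass plus a linear recurrence that derives every first-character transition from the failure table.
import Mathlib
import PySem

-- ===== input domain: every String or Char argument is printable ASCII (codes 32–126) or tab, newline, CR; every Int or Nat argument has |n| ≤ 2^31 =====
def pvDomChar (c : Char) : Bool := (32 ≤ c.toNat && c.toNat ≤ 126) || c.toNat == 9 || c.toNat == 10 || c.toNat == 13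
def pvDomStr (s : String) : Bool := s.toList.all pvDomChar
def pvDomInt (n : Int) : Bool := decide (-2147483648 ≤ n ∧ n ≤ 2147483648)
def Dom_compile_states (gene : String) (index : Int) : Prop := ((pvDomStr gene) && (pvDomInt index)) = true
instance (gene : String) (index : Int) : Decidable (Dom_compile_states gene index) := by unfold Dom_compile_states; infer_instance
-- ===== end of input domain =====

-- B replaces A's per-state largest-suffix-prefix scans by one KMP failure-function
-- pass plus a linear recurrence for the first-character transitions (objective: faster).

-- ===== PORT A =====
-- for i in range(len(prefixed) - 1, 0, -1): if suffixed.endswith(prefixed[:i]): return i ; return 0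
def index_of_largest_suffix_prefix (prefixed suffixed : List Char) : Int :=
  match (PySem.List.pyRange ((prefixed.length : Int) - 1) 0 (-1)).find?
      (fun i => PySem.Chars.endswith suffixed (PySem.List.slice prefixed none (some i))) with
  | some i => i
  | none => 0

def compile_states (gene : String) (index : Int) : List (List (String × Int × List Int)) :=
  let g := gene.toList
  -- special case for genes of length one
  if g.length = 1 then
    [(PySem.Dict.insert (PySem.Dict.empty) gene ((0 : Int), [index])).items]
  else
    (PySem.List.enumerate g 0).foldl (fun states p =>
      let i := p.1
      let char := p.2
      let edges : PySem.Dict String (Int × List Int) :=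
        if i = (g.length : Int) - 1 then
          PySem.Dict.insert (PySem.Dict.empty) (String.ofList [char])
            (index_of_largest_suffix_prefix g g, [index])
        else
          PySem.Dict.insert (PySem.Dict.empty) (String.ofList [char]) (i + 1, [])
      let g0 := g.headD ' '
      let edges :=
        if char ≠ g0 then
          PySem.Dict.insert edges (String.ofList [g0])
            (index_of_largest_suffix_prefix g (PySem.List.slice g none (some i) ++ [g0]), [])
        else edges
      states ++ [edges.items]) []

-- ===== PORT B =====
-- while k > 0 and gene[i] != gene[k]: k = fail[k]   (fuel k is enough: fail[k] < k on every admitted run)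
def kmpDescend (g : List Char) (c : Char) (fail : List Nat) : Nat → Nat → Nat
  | 0, k => k
  | fuel+1, k => if 0 < k ∧ g.getD k ' ' ≠ c then kmpDescend g c fail fuel (fail.getD k 0) else k

-- loop body of the failure-function pass (state: the fail list and k)
def failStep (g : List Char) (st : List Nat × Nat) (i : Nat) : List Nat × Nat :=
  let k := kmpDescend g (g.getD i ' ') st.1 st.2 st.2
  let k := if g.getD i ' ' = g.getD k ' ' then k + 1 else k
  (st.1.set (i+1) k, k)

def buildFail (g : List Char) : List Nat :=
  ((List.range' 1 (g.length - 1)).foldl (failStep g) (List.replicate (g.length + 1) 0, 0)).1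

-- loop body of the trans pass: trans[i] = i+1 if gene[i] == first else trans[fail[i]]
def transStep (g : List Char) (fail : List Nat) (tr : List Nat) (i : Nat) : List Nat :=
  tr.set i (if g.getD i ' ' = g.headD ' ' then i + 1 else tr.getD (fail.getD i 0) 0)

def buildTrans (g : List Char) (fail : List Nat) : List Nat :=
  (List.range' 1 (g.length - 1)).foldl (transStep g fail) (List.replicate g.length 1)

def compile_states_alt (gene : String) (index : Int) : List (List (String × Int × List Int)) :=
  let g := gene.toList
  let L := g.length
  let fail := buildFail g
  let first := g.headD ' '
  let trans := buildTrans g fail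
  (List.range L).foldl (fun states i =>
    let edges : PySem.Dict String (Int × List Int) :=
      if i = L - 1 then
        PySem.Dict.insert (PySem.Dict.empty) (String.ofList [g.getD i ' '])
          ((fail.getD L 0 : Int), [index])
      else
        PySem.Dict.insert (PySem.Dict.empty) (String.ofList [g.getD i ' '])
          ((i : Int) + 1, [])
    let edges :=
      if g.getD i ' ' ≠ first then
        PySem.Dict.insert edges (String.ofList [first]) ((trans.getD i 0 : Int), [])
      else edges
    states ++ [edges.items]) []

-- ===== PRECONDITION & SPEC =====
-- A (and B) assert gene nonempty and index >= 0; on every other input both raise AssertionError.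
def Pre_compile_states (gene : String) (index : Int) : Prop := gene.toList ≠ [] ∧ 0 ≤ index
instance (gene : String) (index : Int) : Decidable (Pre_compile_states gene index) := by
  unfold Pre_compile_states; infer_instance
def pvWitness_compile_states : String × Int := ("aba", 1)

def Spec_compile_states (gene : String) (index : Int) (out : List (List (String × Int × List Int))) : Prop := out = compile_states_alt gene index
instance (gene : String) (index : Int) (out : List (List (String × Int × List Int))) : Decidable (Spec_compile_states gene index out) := by unfold Spec_compile_states; infer_instance

-- ===== CLAIM (what is proved, stated in full; the proofs are below) =====
def Claim_equal_compile_states : Prop := ∀ (gene : String) (index : Int), Dom_compile_states gene index → Pre_compile_states gene index → Spec_compile_states gene index (compile_states gene index)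

-- ===== LEMMAS AND PROOFS =====

-- mbf g m = length of the longest proper prefix of g that is a suffix of g.take m
def mbf (g : List Char) (m : Nat) : Nat :=
  Nat.findGreatest (fun k => g.take k <:+ g.take m) (m - 1)

-- MxP g i = largest k ≤ i with g.take k a suffix of g.take i and g[k] = g[0]
def MxP (g : List Char) (i : Nat) : Nat :=
  Nat.findGreatest (fun k => g.take k <:+ g.take i ∧ g.getD k ' ' = g.getD 0 ' ') i

-- the per-state dict A builds (the loop body of A's fold)
def edgesA (g : List Char) (index : Int) (p : Int × Char) : List (String × Int × List Int) :=
  let i := p.1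
  let char := p.2
  let edges : PySem.Dict String (Int × List Int) :=
    if i = (g.length : Int) - 1 then
      PySem.Dict.insert (PySem.Dict.empty) (String.ofList [char])
        (index_of_largest_suffix_prefix g g, [index])
    else
      PySem.Dict.insert (PySem.Dict.empty) (String.ofList [char]) (i + 1, [])
  let g0 := g.headD ' '
  let edges :=
    if char ≠ g0 then
      PySem.Dict.insert edges (String.ofList [g0])
        (index_of_largest_suffix_prefix g (PySem.List.slice g none (some i) ++ [g0]), [])
    else edges
  edges.items

-- the per-state dict B builds (the loop body of B's fold)
def edgesB (g : List Char) (index : Int) (i : Nat) : List (String × Int × List Int) :=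
  let edges : PySem.Dict String (Int × List Int) :=
    if i = g.length - 1 then
      PySem.Dict.insert (PySem.Dict.empty) (String.ofList [g.getD i ' '])
        (((buildFail g).getD g.length 0 : Int), [index])
    else
      PySem.Dict.insert (PySem.Dict.empty) (String.ofList [g.getD i ' '])
        ((i : Int) + 1, [])
  let edges :=
    if g.getD i ' ' ≠ g.headD ' ' then
      PySem.Dict.insert edges (String.ofList [g.headD ' '])
        (((buildTrans g (buildFail g)).getD i 0 : Int), [])
    else edges
  edges.items

lemma headD_eq_getD_zero (g : List Char) : g.headD ' ' = g.getD 0 ' ' := by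
  cases g <;> simp [List.getD]

lemma findGreatest_congr (P Q : Nat → Prop) [DecidablePred P] [DecidablePred Q] (n : Nat)
    (h : ∀ k, P k ↔ Q k) : Nat.findGreatest P n = Nat.findGreatest Q n := by
  induction n with
  | zero => rfl
  | succ n ih =>
      rw [Nat.findGreatest_succ, Nat.findGreatest_succ, ih]
      exact if_congr (h _) rfl rfl

lemma suffix_append_singleton_iff {α : Type} {s t : List α} {a b : α} :
    s ++ [a] <:+ t ++ [b] ↔ a = b ∧ s <:+ t := by
  rw [← List.reverse_prefix, List.reverse_append, List.reverse_append]
  simp only [List.reverse_singleton, List.singleton_append, List.cons_prefix_cons,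
    List.reverse_prefix]

lemma take_le_of_take_suffix_take {g : List Char} {k m : Nat} (hk : k ≤ g.length)
    (h : g.take k <:+ g.take m) : k ≤ m := by
  have := h.length_le
  simp [List.length_take] at this
  omega

lemma border_succ_iff (g : List Char) (c : Char) (m k : Nat) (hk : k < g.length) :
    g.take (k+1) <:+ g.take m ++ [c] ↔ g.take k <:+ g.take m ∧ g.getD k ' ' = c := by
  rw [List.take_succ_eq_append_getElem hk, suffix_append_singleton_iff,
    List.getD_eq_getElem g ' ' hk]
  constructor
  · rintro ⟨h1, h2⟩; exact ⟨h2, h1⟩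
  · rintro ⟨h1, h2⟩; exact ⟨h2, h1⟩

lemma take_succ_getD (g : List Char) (i : Nat) (hi : i < g.length) :
    g.take (i+1) = g.take i ++ [g.getD i ' '] := by
  rw [List.take_succ_eq_append_getElem hi, List.getD_eq_getElem g ' ' hi]

lemma find?_countdown (p : Int → Bool) (q : Nat → Bool) : ∀ (n : Nat),
    (∀ k : Nat, 1 ≤ k → k ≤ n → p (k : Int) = q k) →
    (match (PySem.List.pyRange (n : Int) 0 (-1)).find? p with | some i => i | none => 0)
      = (Nat.findGreatest (fun k => q k = true) n : Int)
  | 0, _ => by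
      rw [PySem.List.pyRange_neg_one_eq_nil (by omega)]
      simp
  | n+1, h => by
      rw [PySem.List.pyRange_neg_one_cons (by exact_mod_cast Nat.succ_pos n)]
      have hc : ((n+1 : Nat) : Int) - 1 = ((n : Nat) : Int) := by push_cast; ring
      rw [hc, List.find?_cons]
      by_cases hp : p ((n+1 : Nat) : Int)
      · have hq : q (n+1) = true := by rw [← h (n+1) (by omega) le_rfl]; exact hp
        simp only [hp]
        rw [Nat.findGreatest_eq hq]
      · have hq : ¬ (q (n+1) = true) := by rw [← h (n+1) (by omega) le_rfl]; simpa using hp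
        simp only [Bool.not_eq_true] at hp
        simp only [hp]
        rw [find?_countdown p q n (fun k h1 h2 => h k h1 (by omega)),
          Nat.findGreatest_of_not hq]

lemma iolsp_eq (g s : List Char) (hL : 1 ≤ g.length) :
    index_of_largest_suffix_prefix g s
      = (Nat.findGreatest (fun k => g.take k <:+ s) (g.length - 1) : Int) := by
  unfold index_of_largest_suffix_prefix
  have hcast : ((g.length : Int) - 1) = ((g.length - 1 : Nat) : Int) := by omega
  rw [hcast]
  rw [find?_countdown (fun i => PySem.Chars.endswith s (PySem.List.slice g none (some i)))
      (fun k => decide (g.take k <:+ s)) (g.length - 1) ?_]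
  · congr 1
    exact findGreatest_congr _ _ _ (fun k => by simp)
  · intro k h1 h2
    show PySem.Chars.endswith s (PySem.List.slice g none (some ((k : Nat) : Int)))
        = decide (g.take k <:+ s)
    rw [PySem.List.slice_to_natCast]
    rcases Bool.eq_false_or_eq_true (PySem.Chars.endswith s (g.take k)) with hb | hb
    · rw [hb]
      have hs : g.take k <:+ s := (PySem.Chars.endswith_iff s (g.take k)).mp hb
      simp [hs]
    · rw [hb]
      have hns : ¬ (g.take k <:+ s) := fun hx => by
        rw [(PySem.Chars.endswith_iff s (g.take k)).mpr hx] at hb; cases hb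
      simp [hns]

lemma mbf_lt {g : List Char} {m : Nat} (hm : 1 ≤ m) : mbf g m < m := by
  have h : mbf g m ≤ m - 1 := Nat.findGreatest_le (m - 1)
  omega

lemma mbf_border (g : List Char) (m : Nat) : g.take (mbf g m) <:+ g.take m := by
  rcases Nat.eq_zero_or_pos (mbf g m) with h | h
  · simp [h]
  · exact Nat.findGreatest_of_ne_zero (m := mbf g m) rfl (by omega)

lemma mbf_greatest {g : List Char} {k m : Nat} (hk : k < m) (h : g.take k <:+ g.take m) :
    k ≤ mbf g m := by
  rcases Nat.eq_zero_or_pos k with h0 | h0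
  · omega
  · exact Nat.le_findGreatest (by omega) h

lemma chain_down {g : List Char} {k m : Nat} (hm : m ≤ g.length) (hkm : k < m)
    (h1 : k < mbf g m) (h2 : g.take k <:+ g.take m) : g.take k <:+ g.take (mbf g m) := by
  have hle : mbf g m ≤ m - 1 := Nat.findGreatest_le (m - 1)
  exact List.suffix_of_suffix_length_le h2 (mbf_border g m) (by simp [List.length_take]; omega)

lemma chain_up {g : List Char} {k m : Nat} (h : g.take k <:+ g.take (mbf g m)) :
    g.take k <:+ g.take m :=
  h.trans (mbf_border g m)

lemma descend_spec (g : List Char) (c : Char) (fail : List Nat) (i : Nat)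
    (hfail : ∀ m, 1 ≤ m → m < i → fail.getD m 0 = mbf g m) (hiL : i ≤ g.length) :
    ∀ fuel k, k ≤ fuel → k < i → g.take k <:+ g.take i →
      (∀ k', k < k' → k' < i → g.take k' <:+ g.take i → g.getD k' ' ' ≠ c) →
      (kmpDescend g c fail fuel k < i ∧
       g.take (kmpDescend g c fail fuel k) <:+ g.take i ∧
       (kmpDescend g c fail fuel k = 0 ∨ g.getD (kmpDescend g c fail fuel k) ' ' = c) ∧
       (∀ k', kmpDescend g c fail fuel k < k' → k' < i → g.take k' <:+ g.take i →
          g.getD k' ' ' ≠ c)) := by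
  intro fuel
  induction fuel with
  | zero =>
      intro k hk hki hb hmax
      have hk0 : k = 0 := by omega
      subst hk0
      exact ⟨hki, hb, Or.inl rfl, hmax⟩
  | succ fuel ih =>
      intro k hk hki hb hmax
      by_cases hcond : 0 < k ∧ g.getD k ' ' ≠ c
      · have hstep : kmpDescend g c fail (fuel+1) k = kmpDescend g c fail fuel (fail.getD k 0) := by
          simp only [kmpDescend]; rw [if_pos hcond]
        rw [hstep]
        have hfk : fail.getD k 0 = mbf g k := hfail k (by omega) hki
        have hmbk : mbf g k < k := mbf_lt (by omega)
        rw [hfk]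
        apply ih
        · omega
        · omega
        · exact (mbf_border g k).trans hb
        · intro k' h1 h2 h3
          rcases lt_trichotomy k' k with hlt | heq | hgt
          · intro hcc
            have hkk : g.take k' <:+ g.take k :=
              List.suffix_of_suffix_length_le h3 hb (by simp [List.length_take]; omega)
            have := mbf_greatest hlt hkk
            omega
          · subst heq; exact hcond.2
          · exact hmax k' hgt h2 h3
      · have hstep : kmpDescend g c fail (fuel+1) k = k := by
          simp only [kmpDescend]; rw [if_neg hcond]
        rw [hstep]
        refine ⟨hki, hb, ?_, hmax⟩
        by_cases h0 : k = 0
        · exact Or.inl h0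
        · by_cases hgc : g.getD k ' ' = c
          · exact Or.inr hgc
          · exact absurd ⟨Nat.pos_of_ne_zero h0, hgc⟩ hcond

lemma mb_succ_eq (g : List Char) (i r : Nat) (h2 : i < g.length) (hr : r < i)
    (hb : g.take r <:+ g.take i)
    (hrc : r = 0 ∨ g.getD r ' ' = g.getD i ' ')
    (hmax : ∀ k', r < k' → k' < i → g.take k' <:+ g.take i → g.getD k' ' ' ≠ g.getD i ' ') :
    mbf g (i+1) = if g.getD i ' ' = g.getD r ' ' then r + 1 else r := by
  have hti : g.take (i+1) = g.take i ++ [g.getD i ' '] := take_succ_getD g i h2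
  unfold mbf
  simp only [Nat.add_sub_cancel]
  split_ifs with hc
  · apply Nat.findGreatest_eq_iff.mpr
    refine ⟨by omega, fun _ => ?_, fun n hn1 hn2 hP => ?_⟩
    · rw [hti]; exact (border_succ_iff g _ i r (by omega)).mpr ⟨hb, hc.symm⟩
    · rw [hti] at hP
      obtain ⟨m', rfl⟩ : ∃ m', n = m'+1 := ⟨n-1, by omega⟩
      have hB := (border_succ_iff g _ i m' (by omega)).mp hP
      exact hmax m' (by omega) (by omega) hB.1 hB.2
  · have hr0 : r = 0 := by
      rcases hrc with h | h
      · exact h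
      · exact absurd h.symm hc
    subst hr0
    apply Nat.findGreatest_eq_iff.mpr
    refine ⟨Nat.zero_le _, fun h => absurd rfl h, fun n hn1 hn2 hP => ?_⟩
    rw [hti] at hP
    obtain ⟨m', rfl⟩ : ∃ m', n = m'+1 := ⟨n-1, by omega⟩
    have hB := (border_succ_iff g _ i m' (by omega)).mp hP
    rcases Nat.eq_zero_or_pos m' with h0 | h0
    · subst h0; exact hc hB.2.symm
    · exact hmax m' h0 (by omega) hB.1 hB.2

lemma failStep_correct (g : List Char) (i : Nat) (st : List Nat × Nat)
    (h1 : 1 ≤ i) (h2 : i < g.length) (hlen : st.1.length = g.length + 1)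
    (hk : st.2 = mbf g i) (hfail : ∀ m, 1 ≤ m → m ≤ i → st.1.getD m 0 = mbf g m) :
    (failStep g st i).1.length = g.length + 1 ∧ (failStep g st i).2 = mbf g (i+1) ∧
    (∀ m, 1 ≤ m → m ≤ i+1 → (failStep g st i).1.getD m 0 = mbf g m) := by
  have hmbi : mbf g i < i := mbf_lt h1
  have hd := descend_spec g (g.getD i ' ') st.1 i
      (fun m hm1 hm2 => hfail m hm1 (by omega)) (le_of_lt h2) st.2 st.2 le_rfl
      (by rw [hk]; exact hmbi) (by rw [hk]; exact mbf_border g i)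
      (by
        intro k' hk1 hk2 hk3
        rw [hk] at hk1
        exact absurd (mbf_greatest hk2 hk3) (by omega))
  set r := kmpDescend g (g.getD i ' ') st.1 st.2 st.2 with hrdef
  obtain ⟨hri, hrb, hrc, hrmax⟩ := hd
  have hmb : mbf g (i+1) = if g.getD i ' ' = g.getD r ' ' then r + 1 else r :=
    mb_succ_eq g i r h2 hri hrb hrc hrmax
  have hnew : (failStep g st i).2 = if g.getD i ' ' = g.getD r ' ' then r + 1 else r := rfl
  have hfst : (failStep g st i).1
      = st.1.set (i+1) (if g.getD i ' ' = g.getD r ' ' then r + 1 else r) := rfl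
  refine ⟨by rw [hfst]; simp [hlen], by rw [hnew, hmb], ?_⟩
  intro m hm1 hm2
  rw [hfst]
  rcases Nat.lt_or_ge m (i+1) with hmi | hmi
  · rw [List.getD, List.getElem?_set_ne (by omega)]
    exact hfail m hm1 (by omega)
  · have : m = i+1 := by omega
    subst this
    rw [List.getD, List.getElem?_set_self (by omega), Option.getD_some, hmb]

lemma buildFail_inv (g : List Char) (hL : 1 ≤ g.length) : ∀ n, n ≤ g.length - 1 →
    (((List.range' 1 n).foldl (failStep g) (List.replicate (g.length+1) 0, 0)).1.length
        = g.length + 1)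
  ∧ (((List.range' 1 n).foldl (failStep g) (List.replicate (g.length+1) 0, 0)).2 = mbf g (n+1))
  ∧ (∀ m, 1 ≤ m → m ≤ n+1 →
      ((List.range' 1 n).foldl (failStep g) (List.replicate (g.length+1) 0, 0)).1.getD m 0
        = mbf g m)
  | 0, _ => by
      refine ⟨by simp, ?_, ?_⟩
      · show (0 : Nat) = mbf g 1
        unfold mbf
        simp
      · intro m h1 h2
        have hm1 : m = 1 := by omega
        subst hm1
        show (List.replicate (g.length+1) 0).getD 1 0 = mbf g 1
        rw [List.getD, List.getElem?_replicate]
        split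
        · rfl
        · exfalso; omega
  | n+1, h => by
      rw [List.range'_1_concat, Nat.add_comm 1 n, List.foldl_append, List.foldl_cons,
        List.foldl_nil]
      have prev := buildFail_inv g hL n (by omega)
      have step := failStep_correct g (n+1) _ (by omega) (by omega) prev.1 prev.2.1
        (fun m hm1 hm2 => prev.2.2 m hm1 hm2)
      exact step

lemma buildFail_spec (g : List Char) (hL : 1 ≤ g.length) :
    (∀ m, 1 ≤ m → m ≤ g.length → (buildFail g).getD m 0 = mbf g m) := by
  intro m h1 h2
  have := (buildFail_inv g hL (g.length - 1) le_rfl).2.2 m h1 (by omega)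
  exact this

lemma MxP_self (g : List Char) (i : Nat) (h : g.getD i ' ' = g.getD 0 ' ') : MxP g i = i := by
  have h1 : i ≤ MxP g i := Nat.le_findGreatest le_rfl ⟨List.suffix_refl _, h⟩
  have h2 : MxP g i ≤ i := Nat.findGreatest_le i
  omega

lemma MxP_eq_of_mb (g : List Char) (i : Nat) (h1 : 1 ≤ i) (h2 : i ≤ g.length)
    (hne : g.getD i ' ' ≠ g.getD 0 ' ') : MxP g i = MxP g (mbf g i) := by
  have hmlt : mbf g i < i := mbf_lt h1
  have hNle : MxP g (mbf g i) ≤ mbf g i := Nat.findGreatest_le (mbf g i)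
  apply (Nat.findGreatest_eq_iff).mpr
  refine ⟨by omega, fun h0 => ?_, fun n hn1 hn2 hP => ?_⟩
  · have hsp := Nat.findGreatest_of_ne_zero (m := MxP g (mbf g i)) rfl h0
    exact ⟨chain_up hsp.1, hsp.2⟩
  · rcases Nat.lt_or_ge n i with hni | hni
    · have hnm : n ≤ mbf g i := mbf_greatest hni hP.1
      have hPm : g.take n <:+ g.take (mbf g i) := by
        rcases Nat.lt_or_ge n (mbf g i) with hx | hx
        · exact chain_down h2 hni hx hP.1
        · have hxe : n = mbf g i := by omega
          rw [hxe]
      have hle2 : n ≤ MxP g (mbf g i) := Nat.le_findGreatest hnm ⟨hPm, hP.2⟩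
      omega
    · have hn : n = i := by omega
      subst hn
      exact hne hP.2

lemma buildTrans_inv (g : List Char) (fail : List Nat) (hL : 1 ≤ g.length)
    (hfail : ∀ m, 1 ≤ m → m ≤ g.length → fail.getD m 0 = mbf g m) : ∀ n, n ≤ g.length - 1 →
    (((List.range' 1 n).foldl (transStep g fail) (List.replicate g.length 1)).length = g.length)
  ∧ (∀ i, i ≤ n →
      ((List.range' 1 n).foldl (transStep g fail) (List.replicate g.length 1)).getD i 0
        = MxP g i + 1)
  | 0, _ => by
      refine ⟨by simp, ?_⟩
      intro i hi
      have hi0 : i = 0 := by omega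
      subst hi0
      show (List.replicate g.length 1).getD 0 0 = MxP g 0 + 1
      rw [List.getD, List.getElem?_replicate]
      split
      · rfl
      · exfalso; omega
  | n+1, h => by
      rw [List.range'_1_concat, Nat.add_comm 1 n, List.foldl_append, List.foldl_cons,
        List.foldl_nil]
      have prev := buildTrans_inv g fail hL hfail n (by omega)
      constructor
      · show (List.set _ _ _).length = g.length
        simp [prev.1]
      · intro i hi
        by_cases hin : i = n+1
        · subst hin
          show (List.set _ (n+1) _).getD (n+1) 0 = MxP g (n+1) + 1
          rw [List.getD, List.getElem?_set_self (by rw [prev.1]; omega), Option.getD_some]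
          by_cases hg : g.getD (n+1) ' ' = g.headD ' '
          · rw [if_pos hg]
            rw [MxP_self g (n+1) (by rwa [headD_eq_getD_zero] at hg)]
          · rw [if_neg hg]
            have hf : fail.getD (n+1) 0 = mbf g (n+1) := hfail (n+1) (by omega) (by omega)
            rw [hf]
            have hmlt : mbf g (n+1) < n+1 := mbf_lt (by omega)
            rw [prev.2 (mbf g (n+1)) (by omega)]
            rw [MxP_eq_of_mb g (n+1) (by omega) (by omega)
              (by rwa [headD_eq_getD_zero] at hg)]
        · show (List.set _ (n+1) _).getD i 0 = MxP g i + 1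
          rw [List.getD, List.getElem?_set_ne (by omega)]
          exact prev.2 i (by omega)

lemma buildTrans_spec (g : List Char) (hL : 1 ≤ g.length) :
    ∀ i, i < g.length → (buildTrans g (buildFail g)).getD i 0 = MxP g i + 1 := by
  intro i hi
  exact (buildTrans_inv g (buildFail g) hL (buildFail_spec g hL) (g.length - 1) le_rfl).2 i
    (by omega)

lemma caseThree_eq (g : List Char) (i : Nat) (hi : i < g.length)
    (hne : g.getD i ' ' ≠ g.getD 0 ' ') :
    Nat.findGreatest (fun j => g.take j <:+ g.take i ++ [g.getD 0 ' ']) (g.length - 1)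
      = MxP g i + 1 := by
  have hi1 : 1 ≤ i := by
    rcases Nat.eq_zero_or_pos i with h | h
    · subst h; exact absurd rfl hne
    · exact h
  have hNlt : MxP g i < i := by
    have hle : MxP g i ≤ i := Nat.findGreatest_le i
    rcases eq_or_lt_of_le hle with he | h
    · exfalso
      have := Nat.findGreatest_of_ne_zero (m := MxP g i) rfl (by omega)
      rw [he] at this
      exact hne this.2
    · exact h
  apply Nat.findGreatest_eq_iff.mpr
  refine ⟨by omega, fun _ => ?_, fun n hn1 hn2 hP => ?_⟩
  · apply (border_succ_iff g _ i (MxP g i) (by omega)).mpr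
    rcases Nat.eq_zero_or_pos (MxP g i) with h0 | h0
    · rw [h0]; simp
    · have := Nat.findGreatest_of_ne_zero (m := MxP g i) rfl (by omega)
      exact ⟨this.1, this.2⟩
  · obtain ⟨k, rfl⟩ : ∃ k, n = k+1 := ⟨n-1, by omega⟩
    have hB := (border_succ_iff g _ i k (by omega)).mp hP
    have hki : k ≤ i := take_le_of_take_suffix_take (by omega) hB.1
    have hkM : k ≤ MxP g i := Nat.le_findGreatest hki ⟨hB.1, hB.2⟩
    omega

lemma enumerate_map_eq {β : Type} (g : List Char) (f : Int × Char → β) :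
    (PySem.List.enumerate g 0).map f
      = (List.range g.length).map (fun (k : Nat) => f ((k : Int), g.getD k ' ')) := by
  apply List.ext_getElem
  · simp [PySem.List.length_enumerate]
  · intro k h1 h2
    have hk : k < g.length := by simpa using h2
    simp only [List.getElem_map, PySem.List.getElem_enumerate, List.getElem_range]
    rw [List.getD_eq_getElem g ' ' hk]
    norm_num

lemma altB_eq_map (gene : String) (index : Int) :
    compile_states_alt gene index
      = (List.range gene.toList.length).map (edgesB gene.toList index) := by
  rw [show compile_states_alt gene index
      = (List.range gene.toList.length).foldl
          (fun states i => states ++ [edgesB gene.toList index i]) [] from rfl]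
  rw [PySem.List.foldl_append_singleton_eq_map (edgesB gene.toList index)
    (List.range gene.toList.length) []]
  rw [List.nil_append]

lemma A_eq_map (gene : String) (index : Int) (hne : gene.toList ≠ []) :
    compile_states gene index
      = (List.range gene.toList.length).map
          (fun (k : Nat) => edgesA gene.toList index ((k : Int), gene.toList.getD k ' ')) := by
  by_cases h1 : gene.toList.length = 1
  · obtain ⟨c, hc⟩ := List.length_eq_one_iff.mp h1
    have hgene : gene = String.ofList [c] := by rw [← hc]; exact (String.ofList_toList).symm
    rw [show compile_states gene index
        = (if gene.toList.length = 1 then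
            [(PySem.Dict.insert (PySem.Dict.empty) gene ((0 : Int), [index])).items]
          else
            (PySem.List.enumerate gene.toList 0).foldl
              (fun states p => states ++ [edgesA gene.toList index p]) []) from rfl]
    rw [if_pos h1, h1, List.range_one, List.map_cons, List.map_nil]
    congr 1
    simp only [hc]
    rw [hgene]
    simp [edgesA, index_of_largest_suffix_prefix, PySem.List.pyRange_neg_one_eq_nil,
      List.getD]
  · rw [show compile_states gene index
        = (if gene.toList.length = 1 then
            [(PySem.Dict.insert (PySem.Dict.empty) gene ((0 : Int), [index])).items]
          else
            (PySem.List.enumerate gene.toList 0).foldl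
              (fun states p => states ++ [edgesA gene.toList index p]) []) from rfl]
    rw [if_neg h1]
    rw [PySem.List.foldl_append_singleton_eq_map (edgesA gene.toList index)
      (PySem.List.enumerate gene.toList 0) []]
    rw [List.nil_append]
    exact enumerate_map_eq gene.toList (edgesA gene.toList index)

lemma edges_eq (gene : String) (index : Int) (k : Nat) (hk : k < gene.toList.length)
    (hL : 1 ≤ gene.toList.length) :
    edgesA gene.toList index ((k : Int), gene.toList.getD k ' ')
      = edgesB gene.toList index k := by
  have hval1 : index_of_largest_suffix_prefix gene.toList gene.toList
      = (((buildFail gene.toList).getD gene.toList.length 0 : Nat) : Int) := by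
    rw [iolsp_eq _ _ hL, buildFail_spec gene.toList hL gene.toList.length hL le_rfl]
    congr 1
    unfold mbf
    refine findGreatest_congr _ _ _ (fun j => ?_)
    rw [List.take_length]
  have hval2 : gene.toList.getD k ' ' ≠ gene.toList.headD ' ' →
      index_of_largest_suffix_prefix gene.toList
          (PySem.List.slice gene.toList none (some ((k : Nat) : Int))
            ++ [gene.toList.headD ' '])
        = (((buildTrans gene.toList (buildFail gene.toList)).getD k 0 : Nat) : Int) := by
    intro hne2
    rw [PySem.List.slice_to_natCast, headD_eq_getD_zero, iolsp_eq _ _ hL,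
      buildTrans_spec gene.toList hL k hk,
      caseThree_eq gene.toList k hk (by rwa [headD_eq_getD_zero] at hne2)]
  simp only [edgesA, edgesB]
  by_cases hkL : k = gene.toList.length - 1
  · rw [if_pos (show ((k : Nat) : Int) = ((gene.toList.length : Nat) : Int) - 1 by omega),
      if_pos hkL, hval1]
    by_cases hc2 : gene.toList.getD k ' ' ≠ gene.toList.headD ' '
    · rw [if_pos hc2, if_pos hc2, hval2 hc2]
    · rw [if_neg hc2, if_neg hc2]
  · rw [if_neg (show ¬(((k : Nat) : Int) = ((gene.toList.length : Nat) : Int) - 1) by omega),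
      if_neg hkL]
    by_cases hc2 : gene.toList.getD k ' ' ≠ gene.toList.headD ' '
    · rw [if_pos hc2, if_pos hc2, hval2 hc2]
    · rw [if_neg hc2, if_neg hc2]

-- ===== VERDICT (by name: the statement is the Claim_ definition above) =====
theorem compile_states_spec : Claim_equal_compile_states := by
  intro gene index _ hpre
  unfold Spec_compile_states
  obtain ⟨hne, _⟩ := hpre
  have hL : 1 ≤ gene.toList.length := by
    cases hgl : gene.toList with
    | nil => exact absurd hgl hne
    | cons a t => simp
  rw [A_eq_map gene index hne, altB_eq_map gene index]
  apply List.map_congr_left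
  intro k hkmem
  have hk : k < gene.toList.length := List.mem_range.mp hkmem
  exact edges_eq gene index k hk hL
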